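-- pv_equiv track=rewrite | github.com/herolava259/Coding-Interview-Practice | HackerRankWithAlgorithm/DynamicProgramming/XorAndSum.py | xorAndSum
-- ===== SOURCE A (Python) =====
-- def xorAndSum(a, b):
--     # Write your code here
--     res = 0
--
--     len_a = len(a)
--     len_b = len(b)
--     max_loop = 314159
--     pow2 = 1
--     modk = 1000000007
--     count = 0
--     a = a[::-1]
--     b = b[::-1]
--     for i in range(max_loop):
--         if i < len_b and b[i] == '1':
--             count += 1
--
--         multiplier = count
--         if i < len_a and a[i] == '1':
--             multiplier = max_loop + 1 - count
--
--         res += (multiplier * pow2) % modk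
--         res %= modk
--
--         pow2 = (pow2 * 2) % modk
--
--     for i in range(len_b):
--         res += (count * pow2) % modk
--         res %= modk
--
--         pow2 = (pow2 * 2) % modk
--
--         if b[i] == '1':
--             count -= 1
--
--     return int(res)
-- ===== SOURCE B (Python) =====
-- def xorAndSum(a, b):
--     P = 1000000007
--     M = 314159
--     ar = a[::-1]
--     br = b[::-1]
--     s = min(max(len(ar), len(br)), M)
--     # pad both reversed strings with '0' up to length s and walk them in lockstep
--     ar2 = ar[:s] + '0' * (s - len(ar))
--     br2 = br[:s] + '0' * (s - len(br))
--     res = 0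
--     pw = 1
--     count = 0
--     for ca, cb in zip(ar2, br2):
--         if cb == '1':
--             count += 1
--         if ca == '1':
--             res += (M + 1 - count) * pw
--         else:
--             res += count * pw
--         pw = pw * 2 % P
--     # shifts i = s .. M-1 all use the constant multiplier `count`:
--     # their sum is count * (2^M - 2^s), a closed-form geometric tail
--     pM = pow(2, M, P)
--     res = (res + count * (pM - pw)) % P
--     # wrap-around part: sum_{i<n} count_i * 2^(M+i) where count_i decreases at
--     # the ones of br; closed form from v = value of b's '1'-mask and its popcount
--     nb = ''.join('1' if ch == '1' else '0' for ch in b)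
--     v = int(nb, 2) if nb else 0
--     ones = nb.count('1')
--     n = len(br)
--     p2n = pow(2, n, P)
--     res = (res + pM * (count * (p2n - 1) - ones * p2n + 2 * v)) % P
--     return res
-- ===== Notes on version B (the rewrite author's own statement) =====
-- stated objective: faster
-- what changed: B runs only min(max(len(a),len(b)),314159) lockstep steps over the zipped padded reversed strings, replaces the remaining constant-multiplier iterations of A's 314159-step loop by the closed-form geometric tail count*(2^314159-2^s) mod p, and replaces A's second loop by a closed form in the bit value and popcount of b's '1'-mask.
import Mathlib
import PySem

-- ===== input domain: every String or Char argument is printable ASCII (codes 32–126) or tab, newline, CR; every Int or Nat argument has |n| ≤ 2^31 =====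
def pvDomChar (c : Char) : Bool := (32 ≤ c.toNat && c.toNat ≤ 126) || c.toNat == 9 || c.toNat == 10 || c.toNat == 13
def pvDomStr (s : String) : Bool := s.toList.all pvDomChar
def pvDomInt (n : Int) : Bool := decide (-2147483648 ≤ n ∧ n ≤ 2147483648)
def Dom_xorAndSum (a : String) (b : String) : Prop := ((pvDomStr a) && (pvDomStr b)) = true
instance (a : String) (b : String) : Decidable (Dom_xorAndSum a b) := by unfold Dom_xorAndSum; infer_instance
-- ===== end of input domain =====

-- B shortens A's fixed 314159-iteration loop to min(max(len a, len b), 314159) lockstep steps,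
-- replaces the remaining iterations by the closed-form geometric tail count*(2^314159 - 2^s),
-- and replaces A's second loop by a closed form in the bit value and popcount of b.

-- ===== PORT A =====
-- step of A's first for-loop; a[i]/b[i] are only read under the in-range guard, so pyGetD is exact
def pvAStep1 (ar br : List Char) (lenA lenB : Int) (st : Int × Int × Int) (i : Int) : Int × Int × Int :=
  let res := st.1
  let pow2 := st.2.1
  let count := st.2.2
  let count := if i < lenB ∧ PySem.List.pyGetD br i ' ' = '1' then count + 1 else count
  let multiplier := count
  let multiplier := if i < lenA ∧ PySem.List.pyGetD ar i ' ' = '1' then 314159 + 1 - count else multiplier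
  let res := res + PySem.Int.mod (multiplier * pow2) 1000000007
  let res := PySem.Int.mod res 1000000007
  let pow2 := PySem.Int.mod (pow2 * 2) 1000000007
  (res, pow2, count)

-- step of A's second for-loop (index i is always in range there)
def pvAStep2 (br : List Char) (st : Int × Int × Int) (i : Int) : Int × Int × Int :=
  let res := st.1
  let pow2 := st.2.1
  let count := st.2.2
  let res := res + PySem.Int.mod (count * pow2) 1000000007
  let res := PySem.Int.mod res 1000000007
  let pow2 := PySem.Int.mod (pow2 * 2) 1000000007
  let count := if PySem.List.pyGetD br i ' ' = '1' then count - 1 else count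
  (res, pow2, count)

def xorAndSum (a : String) (b : String) : Int :=
  let len_a : Int := a.toList.length
  let len_b : Int := b.toList.length
  let ar := a.toList.reverse  -- a[::-1]; exact by PySem.Str.slice?_none_none_neg_one
  let br := b.toList.reverse
  let st := (PySem.List.pyRange 0 314159 1).foldl (pvAStep1 ar br len_a len_b) (0, 1, 0)
  let st := (PySem.List.pyRange 0 len_b 1).foldl (pvAStep2 br) st
  st.1

-- ===== PORT B =====
-- pow(2, e, m): square-and-multiply modular exponentiation, as Python's three-argument pow
def pvPowMod (bse : Int) (e : Nat) (m : Int) : Int :=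
  if h : e = 0 then PySem.Int.mod 1 m
  else
    let r := pvPowMod (PySem.Int.mod (bse * bse) m) (e / 2) m
    if e % 2 = 1 then PySem.Int.mod (bse * r) m else r
termination_by e
decreasing_by exact Nat.div_lt_self (Nat.pos_of_ne_zero h) (by norm_num)

-- B's lockstep loop step over the zipped, '0'-padded reversed strings (res is reduced only at the end)
def pvBStep1 (st : Int × Int × Int) (p : Char × Char) : Int × Int × Int :=
  let count := if p.2 = '1' then st.2.2 + 1 else st.2.2
  let res := if p.1 = '1' then st.1 + (314159 + 1 - count) * st.2.1
             else st.1 + count * st.2.1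
  let pw := PySem.Int.mod (st.2.1 * 2) 1000000007
  (res, pw, count)

def xorAndSum_alt (a : String) (b : String) : Int :=
  let ar := a.toList.reverse
  let br := b.toList.reverse
  let s : Int := min (max (ar.length : Int) (br.length : Int)) 314159
  let ar2 := ar.take s.toNat ++ List.replicate (s.toNat - ar.length) '0'
  let br2 := br.take s.toNat ++ List.replicate (s.toNat - br.length) '0'
  let st := (ar2.zip br2).foldl pvBStep1 (0, 1, 0)
  let pM : Int := pvPowMod 2 314159 1000000007
  let res := PySem.Int.mod (st.1 + st.2.2 * (pM - st.2.1)) 1000000007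
  -- wrap-around part: closed form from the bit value v and popcount of b's '1'-mask
  let nb := b.toList.map (fun ch => if ch = '1' then '1' else '0')
  let v : Int := if nb.isEmpty then 0
                 else nb.foldl (fun acc ch => 2 * acc + (if ch = '1' then 1 else 0)) 0
  let ones : Int := ((nb.count '1' : Nat) : Int)
  let p2n : Int := pvPowMod 2 br.length 1000000007
  PySem.Int.mod (res + pM * (st.2.2 * (p2n - 1) - ones * p2n + 2 * v)) 1000000007

-- ===== PRECONDITION & SPEC =====
def Spec_xorAndSum (a : String) (b : String) (out : Int) : Prop := out = xorAndSum_alt a b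
instance (a : String) (b : String) (out : Int) : Decidable (Spec_xorAndSum a b out) := by unfold Spec_xorAndSum; infer_instance

-- ===== CLAIM (what is proved, stated in full; the proofs are below) =====
def Claim_equal_xorAndSum : Prop := ∀ (a : String) (b : String), Dom_xorAndSum a b → Spec_xorAndSum a b (xorAndSum a b)

-- ===== LEMMAS AND PROOFS =====

theorem pvmod_eq (x : Int) : PySem.Int.mod x 1000000007 = x % 1000000007 :=
  PySem.Int.mod_eq_emod_of_pos (by norm_num)

-- reduce an emod-equality to an identity in ZMod 1000000007
theorem pvCong {x y : Int} (h : (x : ZMod 1000000007) = (y : ZMod 1000000007)) :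
    x % 1000000007 = y % 1000000007 := by
  have := (ZMod.intCast_eq_intCast_iff' x y 1000000007).mp h
  exact_mod_cast this

@[simp] theorem pvCastMod (x : Int) :
    (((x % 1000000007 : Int)) : ZMod 1000000007) = (x : ZMod 1000000007) := by
  exact_mod_cast ZMod.intCast_mod x 1000000007

theorem pvmod_add (x y : Int) :
    (x % 1000000007 + y % 1000000007) % 1000000007 = (x + y) % 1000000007 := by
  apply pvCong; push_cast [pvCastMod]; ring

theorem pvPowMod_eq (e : Nat) (bse : Int) :
    pvPowMod bse e 1000000007 = bse ^ e % 1000000007 := by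
  induction e using Nat.strong_induction_on generalizing bse with
  | _ e ih =>
    rw [pvPowMod]
    by_cases h : e = 0
    · simp [h, pvmod_eq]
    · have hlt : e / 2 < e := Nat.div_lt_self (Nat.pos_of_ne_zero h) (by norm_num)
      rw [dif_neg h, ih _ hlt]
      have hsq : (PySem.Int.mod (bse * bse) 1000000007) ^ (e / 2) % 1000000007
          = bse ^ (2 * (e / 2)) % 1000000007 := by
        rw [pvmod_eq]
        apply pvCong
        push_cast [pvCastMod]
        rw [two_mul, pow_add]
        ring
      by_cases hp : e % 2 = 1
      · rw [if_pos hp, pvmod_eq]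
        apply pvCong
        push_cast [pvCastMod, pvmod_eq]
        have he : e = 2 * (e / 2) + 1 := by omega
        conv_rhs => rw [he]
        rw [pow_succ, two_mul, pow_add]
        ring
      · rw [if_neg hp, hsq]
        have : e = 2 * (e / 2) := by omega
        rw [← this]

-- char-level view of A's first-loop step (proof helper)
def pvAStepC (st : Int × Int × Int) (p : Char × Char) : Int × Int × Int :=
  let res := st.1
  let pow2 := st.2.1
  let count := st.2.2
  let count := if p.2 = '1' then count + 1 else count
  let multiplier := count
  let multiplier := if p.1 = '1' then 314159 + 1 - count else multiplier
  let res := res + PySem.Int.mod (multiplier * pow2) 1000000007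
  let res := PySem.Int.mod res 1000000007
  let pow2 := PySem.Int.mod (pow2 * 2) 1000000007
  (res, pow2, count)

-- char-level view of A's second-loop step (proof helper)
def pvAStep2C (st : Int × Int × Int) (ch : Char) : Int × Int × Int :=
  let res := st.1
  let pow2 := st.2.1
  let count := st.2.2
  let res := res + PySem.Int.mod (count * pow2) 1000000007
  let res := PySem.Int.mod res 1000000007
  let pow2 := PySem.Int.mod (pow2 * 2) 1000000007
  let count := if ch = '1' then count - 1 else count
  (res, pow2, count)

theorem pvStep2_eq (br : List Char) (st : Int × Int × Int) (i : Int) :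
    pvAStep2 br st i = pvAStep2C st (PySem.List.pyGetD br i ' ') := rfl

def pvPad (l : List Char) (s : Nat) : List Char := l.take s ++ List.replicate (s - l.length) '0'

theorem pvPad_length (l : List Char) (s : Nat) : (pvPad l s).length = s := by
  simp [pvPad]; omega

theorem pvPad_get (l : List Char) (s j : Nat) (hj : j < s) (h : j < (pvPad l s).length) :
    (pvPad l s)[j] = if hl : j < l.length then l[j] else '0' := by
  by_cases hl : j < l.length
  · rw [dif_pos hl]
    have h1 : j < (l.take s).length := by simp; omega
    unfold pvPad
    rw [List.getElem_append_left h1, List.getElem_take]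
  · rw [dif_neg hl]
    have h1 : (l.take s).length ≤ j := by simp; omega
    unfold pvPad
    rw [List.getElem_append_right h1, List.getElem_replicate]

-- A's first loop, indices [0, s), rewritten as a fold over the zipped padded lists
theorem pvIdxToZip (ar br : List Char) (s : Int) (h0 : (0:Int) ≤ s) (st : Int × Int × Int) :
    (PySem.List.pyRange 0 s 1).foldl (pvAStep1 ar br (ar.length : Int) (br.length : Int)) st
      = ((pvPad ar s.toNat).zip (pvPad br s.toNat)).foldl pvAStepC st := by
  have hzlen : ((pvPad ar s.toNat).zip (pvPad br s.toNat)).length = s.toNat := by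
    simp [List.length_zip, pvPad_length]
  have hbound : ((((pvPad ar s.toNat).zip (pvPad br s.toNat)).length : Nat) : Int) = s := by
    rw [hzlen]; omega
  rw [show PySem.List.pyRange 0 s 1
        = PySem.List.pyRange 0 ((((pvPad ar s.toNat).zip (pvPad br s.toNat)).length : Nat) : Int) 1
        from by rw [hbound],
      ← PySem.List.foldl_pyRange_zero_pyGetD'
        ((pvPad ar s.toNat).zip (pvPad br s.toNat)) (' ', ' ') pvAStepC st]
  apply PySem.List.foldl_congr_mem
  intro acc x hx
  rw [PySem.List.mem_pyRange_one] at hx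
  obtain ⟨hx0, hx1⟩ := hx
  rw [hbound] at hx1
  have hxs : x.toNat < s.toNat := by omega
  have hxz : x.toNat < ((pvPad ar s.toNat).zip (pvPad br s.toNat)).length := by omega
  have hget : PySem.List.pyGetD ((pvPad ar s.toNat).zip (pvPad br s.toNat)) x (' ', ' ')
      = ((pvPad ar s.toNat)[x.toNat]'(by rw [pvPad_length]; omega),
         (pvPad br s.toNat)[x.toNat]'(by rw [pvPad_length]; omega)) := by
    rw [PySem.List.pyGetD_eq_getElem _ _ hx0 (by rw [hzlen]; omega), List.getElem_zip]
  have hA : (x < (ar.length : Int) ∧ PySem.List.pyGetD ar x ' ' = '1')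
      ↔ ((pvPad ar s.toNat)[x.toNat]'(by rw [pvPad_length]; omega) = '1') := by
    rw [pvPad_get ar s.toNat x.toNat hxs]
    by_cases hl : x.toNat < ar.length
    · rw [dif_pos hl, PySem.List.pyGetD_eq_getElem _ _ hx0 (by omega)]
      constructor
      · rintro ⟨-, h⟩; exact h
      · intro h; exact ⟨by omega, h⟩
    · rw [dif_neg hl]
      constructor
      · rintro ⟨h, -⟩; omega
      · intro h; exact absurd h (by decide)
  have hB : (x < (br.length : Int) ∧ PySem.List.pyGetD br x ' ' = '1')
      ↔ ((pvPad br s.toNat)[x.toNat]'(by rw [pvPad_length]; omega) = '1') := by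
    rw [pvPad_get br s.toNat x.toNat hxs]
    by_cases hl : x.toNat < br.length
    · rw [dif_pos hl, PySem.List.pyGetD_eq_getElem _ _ hx0 (by omega)]
      constructor
      · rintro ⟨-, h⟩; exact h
      · intro h; exact ⟨by omega, h⟩
    · rw [dif_neg hl]
      constructor
      · rintro ⟨h, -⟩; omega
      · intro h; exact absurd h (by decide)
  rw [hget]
  simp only [pvAStep1, pvAStepC, hA, hB]

-- A's char-level first-loop state is B's with a reduced res (pw and count coincide)
theorem pvRel : ∀ (l : List (Char × Char)) (resB pw c : Int),
    l.foldl pvAStepC (resB % 1000000007, pw, c)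
      = ((l.foldl pvBStep1 (resB, pw, c)).1 % 1000000007,
         (l.foldl pvBStep1 (resB, pw, c)).2.1,
         (l.foldl pvBStep1 (resB, pw, c)).2.2) := by
  intro l
  induction l with
  | nil => intro resB pw c; rfl
  | cons p t ih =>
    intro resB pw c
    simp only [List.foldl_cons, pvAStepC, pvBStep1, pvmod_eq]
    by_cases h2 : p.2 = '1' <;> by_cases h1 : p.1 = '1'
    · simp only [if_pos h2, if_pos h1]; rw [pvmod_add]; exact ih _ _ _
    · simp only [if_pos h2, if_neg h1]; rw [pvmod_add]; exact ih _ _ _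
    · simp only [if_neg h2, if_pos h1]; rw [pvmod_add]; exact ih _ _ _
    · simp only [if_neg h2, if_neg h1]; rw [pvmod_add]; exact ih _ _ _

-- pw invariant of B's lockstep loop
theorem pvInvB : ∀ (l : List (Char × Char)) (st : Int × Int × Int),
    st.2.1 % 1000000007 = st.2.1 →
    (l.foldl pvBStep1 st).2.1 = (st.2.1 * 2 ^ l.length) % 1000000007 := by
  intro l
  induction l with
  | nil => intro st h; simpa using h.symm
  | cons p t ih =>
    intro st h
    simp only [List.foldl_cons]
    have hstep : (pvBStep1 st p).2.1 = (st.2.1 * 2) % 1000000007 := by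
      simp only [pvBStep1, pvmod_eq]
    have := ih (pvBStep1 st p) (by rw [hstep]; exact Int.emod_emod_of_dvd _ dvd_rfl)
    rw [this, hstep]
    simp only [List.length_cons]
    apply pvCong; push_cast [pvCastMod]; ring

-- the tail of A's first loop: all guards are off, the fold is the geometric series
theorem pvTail (ar br : List Char) (lenA lenB : Int) :
    ∀ (n : Nat) (s res pw count : Int), 0 ≤ s → s + n = 314159 →
      lenA ≤ s → lenB ≤ s →
      res % 1000000007 = res → pw = 2 ^ s.toNat % 1000000007 →
      (PySem.List.pyRange s 314159 1).foldl (pvAStep1 ar br lenA lenB) (res, pw, count)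
        = ((res + count * (2 ^ (314159:Nat) % 1000000007 - pw)) % 1000000007,
           2 ^ (314159:Nat) % 1000000007, count) := by
  intro n
  induction n with
  | zero =>
    intro s res pw count h0 hn hA hB hres hpw
    have hs : s = 314159 := by omega
    subst hs
    rw [PySem.List.pyRange_one_eq_nil (by norm_num)]
    simp only [List.foldl_nil]
    have hp : pw = 2 ^ (314159:Nat) % 1000000007 := by
      rw [hpw]
      have : ((314159:Int)).toNat = (314159:Nat) := by omega
      rw [this]
    rw [hp]
    refine Prod.ext ?_ rfl
    simp [hres]
  | succ n ih =>
    intro s res pw count h0 hn hA hB hres hpw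
    have hlt : s < 314159 := by omega
    rw [PySem.List.pyRange_one_cons hlt, List.foldl_cons]
    have hstep : pvAStep1 ar br lenA lenB (res, pw, count) s
        = ((res + (count * pw) % 1000000007) % 1000000007, (pw * 2) % 1000000007, count) := by
      simp only [pvAStep1, pvmod_eq]
      rw [if_neg (by omega : ¬ (s < lenB ∧ PySem.List.pyGetD br s ' ' = '1')),
          if_neg (by omega : ¬ (s < lenA ∧ PySem.List.pyGetD ar s ' ' = '1'))]
    rw [hstep, ih (s + 1) _ _ count (by omega) (by omega) (by omega) (by omega)
      (Int.emod_emod_of_dvd _ dvd_rfl)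
      (by rw [hpw]
          have ht : (s + 1).toNat = s.toNat + 1 := by omega
          rw [ht]
          apply pvCong; push_cast [pvCastMod]; ring)]
    refine Prod.ext ?_ rfl
    apply pvCong; push_cast [pvCastMod]; ring

-- bit value of a reversed bit list, LSB first
def pvVrev (l : List Char) : Int :=
  l.foldr (fun ch acc => 2 * acc + (if ch = '1' then 1 else 0)) 0

-- closed form of A's second loop
theorem pvL2 : ∀ (l : List Char) (res pw c : Int),
    res % 1000000007 = res → pw % 1000000007 = pw →
    (l.foldl pvAStep2C (res, pw, c)).1
      = (res + pw * (c * (2 ^ l.length - 1)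
          - ((l.countP (fun ch => ch == '1') : Nat) : Int) * 2 ^ l.length
          + 2 * pvVrev l)) % 1000000007 := by
  intro l
  induction l with
  | nil =>
    intro res pw c hres hpw
    simp [pvVrev, hres]
  | cons ch t ih =>
    intro res pw c hres hpw
    simp only [List.foldl_cons]
    have hstep : pvAStep2C (res, pw, c) ch
        = ((res + (c * pw) % 1000000007) % 1000000007, (pw * 2) % 1000000007,
           if ch = '1' then c - 1 else c) := by
      simp only [pvAStep2C, pvmod_eq]
    rw [hstep, ih _ _ _ (Int.emod_emod_of_dvd _ dvd_rfl) (Int.emod_emod_of_dvd _ dvd_rfl)]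
    simp only [List.length_cons, List.countP_cons, pvVrev, List.foldr_cons]
    by_cases hch : ch = '1'
    · simp only [hch, if_pos rfl, (by decide : (('1':Char) == '1') = true), if_true]
      apply pvCong
      push_cast [pvCastMod]
      rw [pow_succ]
      ring
    · have : (ch == '1') = false := by
        simp [hch]
      simp only [if_neg hch, this, if_false]
      apply pvCong
      push_cast [pvCastMod]
      rw [pow_succ]
      ring

theorem xorAndSum_eq_alt (a b : String) : xorAndSum a b = xorAndSum_alt a b := by
  simp only [xorAndSum, xorAndSum_alt, List.length_reverse]
  set ar := a.toList.reverse with har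
  set br := b.toList.reverse with hbr
  rw [show (a.toList.length : Nat) = ar.length from by rw [har, List.length_reverse],
      show (b.toList.length : Nat) = br.length from by rw [hbr, List.length_reverse]]
  set s : Int := min (max (ar.length : Int) (br.length : Int)) 314159 with hs
  have h0s : (0:Int) ≤ s := by rw [hs]; omega
  have hsM : s ≤ 314159 := by rw [hs]; omega
  rw [show ar.take s.toNat ++ List.replicate (s.toNat - ar.length) '0' = pvPad ar s.toNat from rfl,
      show br.take s.toNat ++ List.replicate (s.toNat - br.length) '0' = pvPad br s.toNat from rfl,
      PySem.List.pyRange_one_append 0 s 314159 h0s hsM, List.foldl_append,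
      pvIdxToZip ar br s h0s]
  have hrel := pvRel ((pvPad ar s.toNat).zip (pvPad br s.toNat)) 0 1 0
  rw [show ((0:Int) % 1000000007) = (0:Int) from by norm_num] at hrel
  rw [hrel]
  set stB := ((pvPad ar s.toNat).zip (pvPad br s.toNat)).foldl pvBStep1 ((0:Int), (1:Int), (0:Int)) with hstB
  have hpw : stB.2.1 = 2 ^ s.toNat % 1000000007 := by
    rw [hstB]
    have := pvInvB ((pvPad ar s.toNat).zip (pvPad br s.toNat)) ((0:Int), (1:Int), (0:Int))
      (by norm_num)
    simpa [List.length_zip, pvPad_length] using this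
  -- convert A's second loop to a char fold
  have hA2 : pvAStep2 br = fun st i => pvAStep2C st (PySem.List.pyGetD br i ' ') :=
    funext fun st => funext fun i => pvStep2_eq br st i
  rw [hA2, PySem.List.foldl_pyRange_zero_pyGetD' br ' ' pvAStep2C]
  -- bridges for B's closed-form inputs
  have hv : (if (List.map (fun ch => if ch = '1' then '1' else '0') b.toList).isEmpty then (0:Int)
             else (List.map (fun ch => if ch = '1' then '1' else '0') b.toList).foldl
               (fun acc ch => 2 * acc + (if ch = '1' then 1 else 0)) 0) = pvVrev br := by
    have hcollapse : ∀ (L : List Char), (if L.isEmpty then (0:Int)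
        else L.foldl (fun acc ch => 2 * acc + (if ch = '1' then 1 else 0)) 0)
        = L.foldl (fun acc ch => 2 * acc + (if ch = '1' then 1 else 0)) 0 := by
      intro L; cases L <;> simp
    rw [hcollapse, List.foldl_map, hbr]
    unfold pvVrev
    rw [List.foldr_reverse]
    congr 1
    funext acc ch
    by_cases h : ch = '1' <;> simp [h]
  have hones : (((List.map (fun ch => if ch = '1' then '1' else '0') b.toList).count '1' : Nat) : Int)
      = ((br.countP (fun ch => ch == '1') : Nat) : Int) := by
    rw [List.count_eq_countP, List.countP_map, hbr, List.countP_reverse]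
    congr 2
    funext ch
    by_cases h : ch = '1' <;> simp [h]
  rw [hv, hones]
  by_cases hc : max (ar.length : Int) (br.length : Int) ≤ 314159
  · have hsA : (ar.length : Int) ≤ s := by rw [hs]; omega
    have hsB : (br.length : Int) ≤ s := by rw [hs]; omega
    rw [pvTail ar br (ar.length : Int) (br.length : Int) (314159 - s).toNat s
          (stB.1 % 1000000007) stB.2.1 stB.2.2 h0s (by omega) hsA hsB
          (Int.emod_emod_of_dvd _ dvd_rfl) hpw,
        pvL2 br _ _ _ (Int.emod_emod_of_dvd _ dvd_rfl) (Int.emod_emod_of_dvd _ dvd_rfl)]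
    simp only [pvmod_eq, pvPowMod_eq]
    apply pvCong
    push_cast [pvCastMod]
    ring
  · have hs314 : s = 314159 := by rw [hs]; omega
    rw [show PySem.List.pyRange s 314159 1 = [] from PySem.List.pyRange_one_eq_nil (by omega),
        List.foldl_nil,
        pvL2 br _ _ _ (Int.emod_emod_of_dvd _ dvd_rfl) (by rw [hpw]; exact Int.emod_emod_of_dvd _ dvd_rfl)]
    simp only [pvmod_eq, pvPowMod_eq]
    have hp : stB.2.1 = 2 ^ (314159:Nat) % 1000000007 := by
      rw [hpw, hs314]
      have : ((314159:Int)).toNat = (314159:Nat) := by omega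
      rw [this]
    rw [hp]
    generalize (2 ^ (314159:Nat) % 1000000007 : Int) = X
    apply pvCong
    push_cast [pvCastMod]
    ring

-- ===== VERDICT (by name: the statement is the Claim_ definition above) =====
theorem xorAndSum_spec : Claim_equal_xorAndSum := by
  intro a b _
  exact xorAndSum_eq_alt a b
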